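-- pv_equiv track=rewrite | github.com/Arsen1302/Code-copy-detector | TestData/solutions/problem_780_1_1.py | solution_780_1_1
-- ===== SOURCE A (Python) =====
-- from typing import List
--
-- def solution_780_1_1(queries: List[str], words: List[str]) -> List[int]:
-- 	def solution_780_1_2(s):
-- 		t = sorted(list(s))[0]
-- 		return s.count(t)
-- 	query = [solution_780_1_2(x) for x in queries]
-- 	word = [solution_780_1_2(x) for x in words]
-- 	m = []
-- 	for x in query:
-- 		count = 0
-- 		for y in word:
-- 			if y>x:
-- 				count+=1
-- 		m.append(count)
-- 	return m
-- ===== SOURCE B (Python) =====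
-- def solution_780_1_1(queries, words):
--     def f(s):
--         return s.count(min(s))
--     ws = sorted(f(w) for w in words)
--     n = len(ws)
--     res = []
--     for q in queries:
--         x = f(q)
--         lo, hi = 0, n
--         while lo < hi:
--             mid = (lo + hi) // 2
--             if ws[mid] <= x:
--                 lo = mid + 1
--             else:
--                 hi = mid
--         res.append(n - lo)
--     return res
-- ===== Notes on version B (the rewrite author's own statement) =====
-- stated objective: faster
-- what changed: Replaces the Q*W nested scan with sorting the word frequencies once and answering each query by a hand-written binary search (len - bisect_right).
-- outside the precondition, e.g. on solution_780_1_1([''], ['a']): A raises IndexError, B raises ValueError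
import Mathlib
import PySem

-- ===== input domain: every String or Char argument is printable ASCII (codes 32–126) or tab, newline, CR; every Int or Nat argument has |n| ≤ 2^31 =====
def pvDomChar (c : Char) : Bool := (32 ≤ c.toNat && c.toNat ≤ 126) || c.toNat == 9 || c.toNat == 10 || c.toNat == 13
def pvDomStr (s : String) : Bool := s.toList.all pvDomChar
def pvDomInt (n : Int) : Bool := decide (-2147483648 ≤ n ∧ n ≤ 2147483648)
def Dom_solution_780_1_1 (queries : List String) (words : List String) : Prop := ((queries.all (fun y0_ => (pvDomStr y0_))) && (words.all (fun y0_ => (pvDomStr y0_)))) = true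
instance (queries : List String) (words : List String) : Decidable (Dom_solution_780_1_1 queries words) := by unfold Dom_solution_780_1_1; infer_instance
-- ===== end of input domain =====

-- B replaces A's Q×W nested scan by sorting the word frequencies once and answering
-- each query with a hand-written binary search (n - bisect_right).

-- ===== PORT A =====
-- solution_780_1_2(s): t = sorted(list(s))[0]; return s.count(t)   (IndexError on s = '', excluded by Pre_)
def pvA_f (s : String) : Int :=
  match PySem.List.pyGet? (PySem.List.sorted s.toList id) (0 : Int) with
  | some t => (PySem.Str.count s (String.ofList [t]) : Int)
  | none => 0   -- Python raises IndexError here (s = ''); outside Pre_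

def solution_780_1_1 (queries : List String) (words : List String) : List Int :=
  let query := queries.map pvA_f
  let word := words.map pvA_f
  query.foldl (fun m x =>
    m ++ [word.foldl (fun count y => if y > x then count + 1 else count) (0 : Int)]) []

-- ===== PORT B =====
-- f(s): return s.count(min(s))   (ValueError on s = '', excluded by Pre_)
def pvB_f (s : String) : Int :=
  match PySem.List.min? s.toList id with
  | some t => (PySem.Str.count s (String.ofList [t]) : Int)
  | none => 0   -- Python raises ValueError here (s = ''); outside Pre_

-- the while lo < hi loop; fuel = ws.length makes it total (the loop always terminates within that many steps)
def pvB_bs (ws : List Int) (x : Int) (lo hi : Int) (fuel : Nat) : Int :=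
  match fuel with
  | 0 => lo
  | fuel + 1 =>
    if lo < hi then
      let mid := PySem.Int.floordiv (lo + hi) 2
      if ((PySem.List.pyGet? ws mid).getD 0) ≤ x then pvB_bs ws x (mid + 1) hi fuel
      else pvB_bs ws x lo mid fuel
    else lo

def solution_780_1_1_alt (queries : List String) (words : List String) : List Int :=
  let ws := PySem.List.sorted (words.map pvB_f) id
  let n : Int := ws.length
  queries.foldl (fun res q => res ++ [n - pvB_bs ws (pvB_f q) 0 n ws.length]) []

-- ===== PRECONDITION & SPEC =====
-- Pre_ excludes empty strings in either list: there A raises IndexError (sorted(s)[0]) and B raises ValueError (min(s)).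
def Pre_solution_780_1_1 (queries : List String) (words : List String) : Prop :=
  (∀ s ∈ queries, s.toList ≠ []) ∧ (∀ s ∈ words, s.toList ≠ [])
instance (queries : List String) (words : List String) : Decidable (Pre_solution_780_1_1 queries words) := by unfold Pre_solution_780_1_1; infer_instance

def pvWitness_solution_780_1_1 : List String × List String := (["ab", "cc"], ["a", "bb", "ccc"])

def Spec_solution_780_1_1 (queries : List String) (words : List String) (out : List Int) : Prop := out = solution_780_1_1_alt queries words
instance (queries : List String) (words : List String) (out : List Int) : Decidable (Spec_solution_780_1_1 queries words out) := by unfold Spec_solution_780_1_1; infer_instance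

-- ===== CLAIM (what is proved, stated in full; the proofs are below) =====
def Claim_equal_solution_780_1_1 : Prop := ∀ (queries : List String) (words : List String), Dom_solution_780_1_1 queries words → Pre_solution_780_1_1 queries words → Spec_solution_780_1_1 queries words (solution_780_1_1 queries words)

-- ===== LEMMAS AND PROOFS =====

theorem pvf_eq (s : String) (hs : s.toList ≠ []) : pvA_f s = pvB_f s := by
  unfold pvA_f pvB_f
  obtain ⟨m, hm⟩ : ∃ m, PySem.List.min? s.toList id = some m := by
    cases h : PySem.List.min? s.toList id with
    | none => exact absurd ((PySem.List.min?_eq_none_iff _ _).mp h) hs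
    | some m => exact ⟨m, rfl⟩
  have hsn : PySem.List.sorted s.toList id ≠ [] := by
    simpa [PySem.List.sorted_eq_nil_iff] using hs
  obtain ⟨t, rest, hrest⟩ : ∃ t rest, PySem.List.sorted s.toList id = t :: rest := by
    cases h : PySem.List.sorted s.toList id with
    | nil => exact absurd h hsn
    | cons t rest => exact ⟨t, rest, rfl⟩
  have hperm := PySem.List.sorted_perm s.toList id false
  have hpw := PySem.List.sorted_pairwise s.toList id
  rw [hrest] at hperm hpw
  have htmem : t ∈ s.toList := hperm.mem_iff.mp (List.mem_cons_self)
  have htle : ∀ y ∈ s.toList, t ≤ y := by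
    intro y hy
    rcases List.mem_cons.mp (hperm.mem_iff.mpr hy) with h | h
    · exact le_of_eq h.symm
    · exact (List.pairwise_cons.mp hpw).1 y h
  have hmmem : m ∈ s.toList := PySem.List.min?_mem hm
  have hmle : ∀ y ∈ s.toList, m ≤ y := PySem.List.min?_isMin hm
  have htm : t = m := le_antisymm (htle m hmmem) (hmle t htmem)
  have hget : PySem.List.pyGet? (PySem.List.sorted s.toList id) (0 : Int) = some t := by
    rw [hrest]
    have : ((0:Nat) : Int) = (0 : Int) := rfl
    rw [← this, PySem.List.pyGet?_natCast]
    simp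
  rw [hget, hm, htm]

theorem pvbs_inv (ws : List Int) (x : Int)
    (hsorted : List.Pairwise (fun a b => a ≤ b) ws) :
    ∀ (fuel : Nat) (lo hi : Int), 0 ≤ lo → lo ≤ hi → hi ≤ (ws.length : Int) →
      hi - lo ≤ (fuel : Int) →
      (∀ j : Nat, (hj : j < ws.length) → (j : Int) < lo → ws[j] ≤ x) →
      (∀ j : Nat, (hj : j < ws.length) → hi ≤ (j : Int) → x < ws[j]) →
      lo ≤ pvB_bs ws x lo hi fuel ∧ pvB_bs ws x lo hi fuel ≤ hi ∧
      (∀ j : Nat, (hj : j < ws.length) → (j : Int) < pvB_bs ws x lo hi fuel → ws[j] ≤ x) ∧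
      (∀ j : Nat, (hj : j < ws.length) → pvB_bs ws x lo hi fuel ≤ (j : Int) → x < ws[j]) := by
  intro fuel
  induction fuel with
  | zero =>
    intro lo hi h0 hlh hhn hf hlow hhigh
    have : lo = hi := le_antisymm hlh (by omega)
    subst this
    simp only [pvB_bs]
    exact ⟨le_refl _, le_refl _, hlow, hhigh⟩
  | succ fuel ih =>
    intro lo hi h0 hlh hhn hf hlow hhigh
    by_cases hlt : lo < hi
    · have hmid := PySem.Int.floordiv_two_mid_bounds (le_of_lt hlt)
      set mid := PySem.Int.floordiv (lo + hi) 2 with hmiddef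
      have hmidlt : mid < hi := by
        rw [hmiddef]
        rw [PySem.Int.floordiv_lt_iff_lt_mul (by norm_num)]
        omega
      have hmidnn : 0 ≤ mid := le_trans h0 hmid.1
      have hmidltn : mid < (ws.length : Int) := lt_of_lt_of_le hmidlt hhn
      have hmidnat : mid.toNat < ws.length := by omega
      have hget : (PySem.List.pyGet? ws mid).getD 0 = ws[mid.toNat] := by
        have : (PySem.List.pyGet? ws mid).getD 0 = PySem.List.pyGetD ws mid 0 := by
          simp [PySem.List.pyGetD, PySem.List.pyGet?]
        rw [this, PySem.List.pyGetD_eq_getElem ws 0 hmidnn hmidltn]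
      simp only [pvB_bs, if_pos hlt, ← hmiddef, hget]
      by_cases hc : ws[mid.toNat] ≤ x
      · rw [if_pos hc]
        have hnewlow : ∀ j : Nat, (hj : j < ws.length) → (j : Int) < mid + 1 → ws[j] ≤ x := by
          intro j hj hjm
          by_cases hjlo : (j : Int) < lo
          · exact hlow j hj hjlo
          · rcases lt_or_eq_of_le (show (j:Int) ≤ mid by omega) with h | h
            · have : j < mid.toNat := by omega
              exact le_trans (List.pairwise_iff_getElem.mp hsorted j mid.toNat hj hmidnat this) hc
            · have : j = mid.toNat := by omega
              subst this; exact hc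
        obtain ⟨h1, h2, h3, h4⟩ := ih (mid + 1) hi (by omega) (by omega) hhn (by omega) hnewlow hhigh
        exact ⟨by omega, h2, h3, h4⟩
      · rw [if_neg hc]
        have hnewhigh : ∀ j : Nat, (hj : j < ws.length) → mid ≤ (j : Int) → x < ws[j] := by
          intro j hj hjm
          rcases lt_or_eq_of_le hjm with h | h
          · have hmj : mid.toNat < j := by omega
            exact lt_of_lt_of_le (lt_of_not_ge hc) (List.pairwise_iff_getElem.mp hsorted mid.toNat j hmidnat hj hmj)
          · have : j = mid.toNat := by omega
            subst this; exact lt_of_not_ge hc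
        obtain ⟨h1, h2, h3, h4⟩ := ih lo mid h0 hmid.1 (le_of_lt hmidltn) (by omega) hlow hnewhigh
        exact ⟨h1, by omega, h3, h4⟩
    · have : lo = hi := le_antisymm hlh (by omega)
      subst this
      simp only [pvB_bs, if_neg hlt]
      exact ⟨le_refl _, le_refl _, hlow, hhigh⟩

theorem pv_count_split (ws : List Int) (p : Int → Bool) (k : Nat) (hk : k ≤ ws.length)
    (hlow : ∀ j : Nat, (hj : j < ws.length) → j < k → ¬ p ws[j] = true)
    (hhigh : ∀ j : Nat, (hj : j < ws.length) → k ≤ j → p ws[j] = true) :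
    ws.countP p = ws.length - k := by
  conv_lhs => rw [← List.take_append_drop k ws]
  rw [List.countP_append]
  have h1 : (ws.take k).countP p = 0 := by
    rw [List.countP_eq_zero]
    intro a ha
    obtain ⟨j, hj, rfl⟩ := List.mem_iff_getElem.mp ha
    have hj' : j < k ∧ j < ws.length := by simpa using hj
    rw [List.getElem_take]
    exact hlow j hj'.2 hj'.1
  have h2 : (ws.drop k).countP p = (ws.drop k).length := by
    rw [List.countP_eq_length]
    intro a ha
    obtain ⟨j, hj, rfl⟩ := List.mem_iff_getElem.mp ha
    rw [List.getElem_drop]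
    exact hhigh (k + j) (by simp at hj; omega) (by omega)
  rw [h1, h2]
  simp

theorem pvB_bs_spec (ws : List Int) (x : Int)
    (hsorted : List.Pairwise (fun a b => a ≤ b) ws) :
    ((ws.length : Int) - pvB_bs ws x 0 (ws.length : Int) ws.length)
      = (ws.countP (fun y => decide (x < y)) : Int) := by
  obtain ⟨h1, h2, h3, h4⟩ := pvbs_inv ws x hsorted ws.length 0 (ws.length : Int)
    (le_refl _) (by omega) (le_refl _) (by omega)
    (fun j hj hjlt => absurd hjlt (by omega))
    (fun j hj hjge => absurd hjge (by omega))
  set r := pvB_bs ws x 0 (ws.length : Int) ws.length with hr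
  have hcount : ws.countP (fun y => decide (x < y)) = ws.length - r.toNat := by
    refine pv_count_split ws _ r.toNat (by omega) ?_ ?_
    · intro j hj hjr
      have := h3 j hj (by omega)
      simp [this]
    · intro j hj hjr
      have := h4 j hj (by omega)
      simpa using this
  rw [hcount]
  omega

-- ===== VERDICT (by name: the statement is the Claim_ definition above) =====
theorem solution_780_1_1_spec : Claim_equal_solution_780_1_1 := by
  intro queries words _hdom hpre
  unfold Spec_solution_780_1_1 solution_780_1_1 solution_780_1_1_alt
  simp only [PySem.List.foldl_append_singleton_eq_map, List.nil_append, List.map_map]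
  have hword : words.map pvA_f = words.map pvB_f :=
    List.map_congr_left (fun s hs => pvf_eq s (hpre.2 s hs))
  set word := words.map pvB_f with hworddef
  set ws := PySem.List.sorted word id with hwsdef
  have hsorted : List.Pairwise (fun a b => a ≤ b) ws := by
    simpa using PySem.List.sorted_pairwise word id
  have hperm : ws.Perm word := PySem.List.sorted_perm word id false
  refine List.map_congr_left (fun q hq => ?_)
  simp only [Function.comp]
  rw [pvf_eq q (hpre.1 q hq), hword]
  set x := pvB_f q with hxdef
  have hfc := PySem.List.foldl_count_if (fun y => decide (x < y)) word 0
  simp only [decide_eq_true_eq] at hfc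
  simp only [gt_iff_lt]
  rw [hfc, pvB_bs_spec ws x hsorted, hperm.countP_eq]
  simp
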